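-- pv_equiv track=rewrite | github.com/GauravB159/ProjectEuler | 040/40.py | getByIndex
-- ===== SOURCE A (Python) =====
-- def getByIndex(idx, totals):
--     for i, total in enumerate(totals):
--         if idx < total:
--             offset = idx // (i+1)
--             inner_offset = idx % (i+1)
--             number = pow(10, i) + offset
--             digit = str(number)[inner_offset]
--             return int(digit)
--         else:
--             idx -= total
-- ===== SOURCE B (Python) =====
-- def getByIndex(idx, totals):
--     pref = []
--     s = 0
--     for t in totals:
--         s += t
--         pref.append(s)
--     hits = [i for i, p in enumerate(pref) if idx < p]
--     if not hits:
--         return None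
--     i = hits[0]
--     base = pref[i - 1] if i > 0 else 0
--     local = idx - base
--     offset, inner = divmod(local, i + 1)
--     return int(str(10 ** i + offset)[inner])
-- ===== Notes on version B (the rewrite author's own statement) =====
-- stated objective: alternative
-- what changed: A's subtract-as-you-go loop that mutates idx while counting blocks is replaced by a prefix-sum list built once, a comprehension collecting the crossing indices, and a direct divmod decode at the first hit using the stored prefix before it.
import Mathlib
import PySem

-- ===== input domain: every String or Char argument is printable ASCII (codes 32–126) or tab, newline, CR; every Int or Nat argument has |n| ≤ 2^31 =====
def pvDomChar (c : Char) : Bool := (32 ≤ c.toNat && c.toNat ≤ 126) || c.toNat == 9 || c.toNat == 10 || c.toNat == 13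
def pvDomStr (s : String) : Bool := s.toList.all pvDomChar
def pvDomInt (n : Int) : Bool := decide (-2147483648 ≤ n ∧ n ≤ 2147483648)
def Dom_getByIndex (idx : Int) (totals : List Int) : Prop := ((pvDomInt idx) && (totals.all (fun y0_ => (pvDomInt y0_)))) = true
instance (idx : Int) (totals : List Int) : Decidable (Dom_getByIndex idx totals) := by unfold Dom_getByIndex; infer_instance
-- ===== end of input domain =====

-- B replaces A's subtract-as-you-go mutation of idx by a prefix-sum list, a comprehension
-- collecting the crossing indices, and a direct divmod decode at the first hit (objective:
-- alternative decomposition, same linear cost).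

-- ===== PORT A =====
-- A's for-loop over enumerate(totals) with the running decrement of idx; [] = the
-- fall-through (Python returns None there; excluded by Pre_, 0 is a junk default).
def getByIndexGo : Int → Nat → List Int → Int
  | _, _, [] => 0
  | idx, i, t :: ts =>
    if idx < t then
      let offset := PySem.Int.floordiv idx ((i : Int) + 1)
      let inner := PySem.Int.mod idx ((i : Int) + 1)
      let number := (10 : Int) ^ i + offset
      -- digit = str(number)[inner_offset]; return int(digit)  (int('-')/IndexError excluded by Pre_)
      match PySem.Str.pyGet? (PySem.Int.toStr number) inner with
      | some c => (PySem.Int.ofChars? [c]).getD 0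
      | none => 0
    else getByIndexGo (idx - t) (i + 1) ts

def getByIndex (idx : Int) (totals : List Int) : Int := getByIndexGo idx 0 totals

-- ===== PORT B =====
def getByIndex_alt (idx : Int) (totals : List Int) : Int :=
  let pref := (totals.foldl (fun (st : List Int × Int) t => (st.1 ++ [st.2 + t], st.2 + t)) ([], 0)).1
  let hits := ((PySem.List.enumerate pref).filter (fun ip => decide (idx < ip.2))).map (fun ip => ip.1)
  match hits with
  | [] => 0   -- Python returns None here; excluded by Pre_
  | i :: _ =>
    let base := if 0 < i then (PySem.List.pyGet? pref (i - 1)).getD 0 else 0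
    let loc := idx - base
    let offset := PySem.Int.floordiv loc (i + 1)
    let inner := PySem.Int.mod loc (i + 1)
    let number := (10 : Int) ^ i.toNat + offset   -- 10 ** i; i ≥ 0 comes from enumerate
    match PySem.Str.pyGet? (PySem.Int.toStr number) inner with
    | some c => (PySem.Int.ofChars? [c]).getD 0
    | none => 0

-- ===== PRECONDITION & SPEC =====
-- Pre_ excludes exactly the inputs where Python A does not return an int: no prefix of the
-- blocks ever exceeds idx (A falls through returning None), and idx ≤ -2 crossing already at
-- the first block (str(number) starts with '-' and int('-') raises ValueError).
def Pre_getByIndex (idx : Int) (totals : List Int) : Prop :=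
  (∃ i ∈ List.range totals.length, idx < (totals.take (i + 1)).sum) ∧
  (idx < -1 → totals.headD 0 ≤ idx)
instance (idx : Int) (totals : List Int) : Decidable (Pre_getByIndex idx totals) := by
  unfold Pre_getByIndex; infer_instance
def pvWitness_getByIndex : Int × List Int := (0, [5])

def Spec_getByIndex (idx : Int) (totals : List Int) (out : Int) : Prop := out = getByIndex_alt idx totals
instance (idx : Int) (totals : List Int) (out : Int) : Decidable (Spec_getByIndex idx totals out) := by unfold Spec_getByIndex; infer_instance

-- ===== CLAIM (what is proved, stated in full; the proofs are below) =====
def Claim_equal_getByIndex : Prop := ∀ (idx : Int) (totals : List Int), Dom_getByIndex idx totals → Pre_getByIndex idx totals → Spec_getByIndex idx totals (getByIndex idx totals)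

-- ===== LEMMAS AND PROOFS =====

-- the decode both ports perform, at global block index k with local offset loc
def pvDecode (k : Nat) (loc : Int) : Int :=
  let offset := PySem.Int.floordiv loc ((k : Int) + 1)
  let inner := PySem.Int.mod loc ((k : Int) + 1)
  let number := (10 : Int) ^ k + offset
  match PySem.Str.pyGet? (PySem.Int.toStr number) inner with
  | some c => (PySem.Int.ofChars? [c]).getD 0
  | none => 0

-- prefix sums of ts starting from s
def pvPref (s : Int) : List Int → List Int
  | [] => []
  | t :: ts => (s + t) :: pvPref (s + t) ts

-- the indices (counted from n) of prefix values exceeding idx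
def pvHits (idx : Int) (pl : List Int) (n : Int) : List Int :=
  ((PySem.List.enumerate pl n).filter (fun ip => decide (idx < ip.2))).map (fun ip => ip.1)

theorem pvPref_foldl (ts : List Int) : ∀ (acc : List Int) (s : Int),
    (ts.foldl (fun (st : List Int × Int) t => (st.1 ++ [st.2 + t], st.2 + t)) (acc, s)).1
      = acc ++ pvPref s ts := by
  induction ts with
  | nil => simp [pvPref]
  | cons t ts ih => intro acc s; simp [pvPref, List.foldl_cons, ih]

theorem pvPref_map (ts : List Int) : ∀ (s : Int), pvPref s ts = (pvPref 0 ts).map (s + ·) := by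
  induction ts with
  | nil => intro s; simp [pvPref]
  | cons t ts ih =>
    intro s
    simp only [pvPref, List.map_cons, zero_add]
    rw [ih (s + t), ih t, List.map_map]
    rw [List.cons.injEq]
    refine ⟨rfl, ?_⟩
    apply List.map_congr_left; intro p _; simp [Function.comp]; ring

theorem pvPref_getElem? (ts : List Int) : ∀ (s : Int) (k : Nat), k < ts.length →
    (pvPref s ts)[k]? = some (s + (ts.take (k + 1)).sum) := by
  induction ts with
  | nil => simp
  | cons t ts ih =>
    intro s k hk
    cases k with
    | zero => simp [pvPref]
    | succ k => simp at hk; simp [pvPref, ih (s + t) k hk]; ring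

theorem pvPref_length : ∀ (ts : List Int) (s : Int), (pvPref s ts).length = ts.length := by
  intro ts
  induction ts with
  | nil => intro s; rfl
  | cons t ts ih => intro s; simp [pvPref, ih]

theorem pvEnumerate_shift {α : Type} (pl : List α) : ∀ (n : Int),
    PySem.List.enumerate pl n = (PySem.List.enumerate pl 0).map (fun p => (p.1 + n, p.2)) := by
  induction pl with
  | nil => intro n; rfl
  | cons x xs ih =>
    intro n
    show (n, x) :: PySem.List.enumerate xs (n+1) = List.map _ ((0, x) :: PySem.List.enumerate xs 1)
    rw [ih (n+1), ih 1]
    simp only [List.map_cons, List.map_map, zero_add]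
    rw [List.cons.injEq]
    refine ⟨rfl, ?_⟩
    apply List.map_congr_left; intro p _; simp [Function.comp]; ring

theorem pvHits_shift (idx : Int) (pl : List Int) (n : Int) :
    pvHits idx pl n = (pvHits idx pl 0).map (· + n) := by
  unfold pvHits
  rw [pvEnumerate_shift pl n, List.filter_map, List.map_map, List.map_map]
  rfl

theorem pvHits_map_add (idx t : Int) (pl : List Int) (n : Int) :
    pvHits idx (pl.map (t + ·)) n = pvHits (idx - t) pl n := by
  unfold pvHits
  induction pl generalizing n with
  | nil => rfl
  | cons p ps ih =>
    show (List.filter _ ((n, t + p) :: PySem.List.enumerate (ps.map (t + ·)) (n+1))).map _ = (List.filter _ ((n, p) :: PySem.List.enumerate ps (n+1))).map _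
    rw [List.filter_cons, List.filter_cons]
    have : (decide (idx < t + p)) = (decide (idx - t < p)) := by
      by_cases h : idx - t < p <;> simp_all <;> omega
    simp only [this]
    by_cases h : idx - t < p <;> simp [h, ih]

theorem pvHits_mem (idx : Int) : ∀ (pl : List Int) (n j : Int), j ∈ pvHits idx pl n →
    n ≤ j ∧ j < n + pl.length := by
  intro pl
  induction pl with
  | nil => intro n j h; simp [pvHits] at h
  | cons p ps ih =>
    intro n j h
    unfold pvHits at h
    rw [show PySem.List.enumerate (p :: ps) n = (n, p) :: PySem.List.enumerate ps (n+1) from rfl,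
        List.filter_cons] at h
    by_cases hc : idx < p
    · simp [hc] at h
      rcases h with h | h
      · subst h; simp
      · have := ih (n+1) j (by unfold pvHits; simpa using h)
        simp; omega
    · simp [hc] at h
      have := ih (n+1) j (by unfold pvHits; simpa using h)
      simp; omega

theorem pvMain (ts : List Int) : ∀ (idx : Int) (i : Nat),
    getByIndexGo idx i ts =
      match pvHits idx (pvPref 0 ts) 0 with
      | [] => 0
      | j :: _ => pvDecode (i + j.toNat) (idx - (ts.take j.toNat).sum) := by
  induction ts with
  | nil => intro idx i; rfl
  | cons t ts ih =>
    intro idx i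
    have hpref : pvPref 0 (t :: ts) = t :: (pvPref 0 ts).map (t + ·) := by
      show (0 + t) :: pvPref (0 + t) ts = _
      rw [zero_add, pvPref_map ts t]
    rw [hpref]
    have htail : ((PySem.List.enumerate ((pvPref 0 ts).map (t + ·)) 1).filter
              (fun ip => decide (idx < ip.2))).map (fun ip => ip.1)
            = (pvHits (idx - t) (pvPref 0 ts) 0).map (· + 1) := by
      rw [show ((PySem.List.enumerate ((pvPref 0 ts).map (t + ·)) 1).filter
              (fun ip => decide (idx < ip.2))).map (fun ip => ip.1)
            = pvHits idx ((pvPref 0 ts).map (t + ·)) 1 from rfl,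
          pvHits_map_add, pvHits_shift]
    have hhits : pvHits idx (t :: (pvPref 0 ts).map (t + ·)) 0
        = (if idx < t then [(0 : Int)] else []) ++ (pvHits (idx - t) (pvPref 0 ts) 0).map (· + 1) := by
      unfold pvHits
      rw [show PySem.List.enumerate (t :: (pvPref 0 ts).map (t + ·)) 0
            = (0, t) :: PySem.List.enumerate ((pvPref 0 ts).map (t + ·)) 1 from rfl,
          List.filter_cons]
      by_cases h : idx < t
      · simp only [h, decide_true, if_true, List.map_cons, List.singleton_append]
        rw [htail]; rfl
      · simp only [h, decide_false, Bool.false_eq_true, if_false, List.nil_append]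
        rw [htail]; rfl
    rw [hhits]
    by_cases h : idx < t
    · simp only [h, if_true, List.singleton_append]
      show (if idx < t then _ else _) = _
      rw [if_pos h]
      simp [pvDecode]
    · simp only [h, if_false, List.nil_append]
      rw [show getByIndexGo idx i (t :: ts) = getByIndexGo (idx - t) (i + 1) ts from by
            simp [getByIndexGo, h],
          ih (idx - t) (i + 1)]
      cases hcase : pvHits (idx - t) (pvPref 0 ts) 0 with
      | nil => rfl
      | cons j rest =>
        have hj : 0 ≤ j := by
          have := pvHits_mem (idx - t) (pvPref 0 ts) 0 j (by rw [hcase]; exact List.mem_cons_self)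
          omega
        simp only [List.map_cons]
        have h1 : (j + 1).toNat = j.toNat + 1 := by omega
        rw [h1]
        have h2 : ((t :: ts).take (j.toNat + 1)).sum = t + (ts.take j.toNat).sum := by
          simp [List.take_succ_cons]
        rw [h2]
        have h3 : i + 1 + j.toNat = i + (j.toNat + 1) := by omega
        rw [h3]
        congr 1
        ring

-- the two ports agree on every input (the Lean fallbacks of the regions Pre_ excludes coincide)
theorem pvTotalEq (idx : Int) (totals : List Int) : getByIndex idx totals = getByIndex_alt idx totals := by
  have hh : ((PySem.List.enumerate (pvPref 0 totals)).filter (fun ip => decide (idx < ip.2))).map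
      (fun ip => ip.1) = pvHits idx (pvPref 0 totals) 0 := rfl
  unfold getByIndex getByIndex_alt
  simp only [pvPref_foldl totals [] 0, List.nil_append, hh]
  rw [pvMain totals idx 0]
  cases hcase : pvHits idx (pvPref 0 totals) 0 with
  | nil => rfl
  | cons j rest =>
    have hj := pvHits_mem idx (pvPref 0 totals) 0 j (by rw [hcase]; exact List.mem_cons_self)
    rw [pvPref_length] at hj
    have hbase : (if 0 < j then (PySem.List.pyGet? (pvPref 0 totals) (j - 1)).getD 0 else 0)
        = (totals.take j.toNat).sum := by
      by_cases h0 : 0 < j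
      · rw [if_pos h0]
        have hcast : j - 1 = ((j.toNat - 1 : Nat) : Int) := by omega
        rw [hcast, PySem.List.pyGet?_natCast]
        have hlt : j.toNat - 1 < totals.length := by omega
        rw [pvPref_getElem? totals 0 (j.toNat - 1) hlt]
        have : j.toNat - 1 + 1 = j.toNat := by omega
        rw [this]
        simp
      · rw [if_neg h0]
        have : j.toNat = 0 := by omega
        rw [this]
        simp
    simp only [hbase]
    unfold pvDecode
    have hc : ((j.toNat : Nat) : Int) = j := by omega
    simp only [hc, Nat.zero_add]

-- ===== VERDICT (by name: the statement is the Claim_ definition above) =====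
theorem getByIndex_spec : Claim_equal_getByIndex := by
  intro idx totals _ _
  unfold Spec_getByIndex
  exact pvTotalEq idx totals
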